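-- pv_equiv track=rewrite | github.com/dimyvi/study_programs | course2/module 4/matrices_part2_step_9.py | full_numbers
-- ===== SOURCE A (Python) =====
-- def full_numbers(ls):
--     static_list = [int(i) for i in range(1, len(ls) ** 2 + 1)]
--     ls_n = []
--     for i in range(len(ls)):
--         for j in range(len(ls)):
--             ls_n.append(ls[i][j])
--     ls_n.sort()
--     return ls_n == static_list
-- ===== SOURCE B (Python) =====
-- def full_numbers(ls):
--     n = len(ls)
--     target = n * n
--     vals = [v for row in ls for v in row[:n]]
--     if len(vals) != target:
--         return False
--     seen = set()
--     for v in vals: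
--         if v < 1 or v > target or v in seen:
--             return False
--         seen.add(v)
--     return True
-- ===== Notes on version B (the rewrite author's own statement) =====
-- stated objective: faster
-- what changed: Replaced flatten-all + sort + compare against the list [1..n^2] by a single early-exit pass over the entries that rejects out-of-range values and duplicates via a 'seen' set (plus a length check), removing the sort.
import Mathlib
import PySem

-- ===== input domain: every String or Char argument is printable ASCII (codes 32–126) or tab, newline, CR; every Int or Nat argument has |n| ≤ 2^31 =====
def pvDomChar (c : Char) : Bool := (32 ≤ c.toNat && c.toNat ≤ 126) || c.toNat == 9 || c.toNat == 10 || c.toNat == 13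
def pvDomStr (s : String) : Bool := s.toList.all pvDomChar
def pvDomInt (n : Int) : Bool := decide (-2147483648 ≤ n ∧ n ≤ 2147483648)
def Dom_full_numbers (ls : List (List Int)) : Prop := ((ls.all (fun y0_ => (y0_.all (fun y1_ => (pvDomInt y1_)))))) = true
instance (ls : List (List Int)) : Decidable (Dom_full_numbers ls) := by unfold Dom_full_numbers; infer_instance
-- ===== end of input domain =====

-- B replaces A's flatten + sort + compare-to-[1..n²] by a single early-exit pass
-- over the entries with a 'seen' set (alternative algorithm: O(n²) expected vs O(n² log n)).

-- ===== PORT A =====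
def full_numbers (ls : List (List Int)) : Bool :=
  let n : Int := (ls.length : Int)
  let static_list : List Int := PySem.List.pyRange 1 (n ^ 2 + 1) 1
  let ls_n : List Int :=
    (PySem.List.pyRange 0 n 1).foldl (fun acc i =>
      (PySem.List.pyRange 0 n 1).foldl (fun acc j =>
        acc ++ [PySem.List.pyGetD (PySem.List.pyGetD ls i []) j 0]) acc) []
  -- pyGetD is exact here because Pre_full_numbers keeps every index in range
  decide (PySem.List.sorted ls_n (fun x => x) false = static_list)

-- ===== PORT B =====
-- the early-exit 'for v in vals' loop of Source B
def pvAltLoop (target : Int) (seen : PySem.Set Int) (vals : List Int) : Bool :=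
  match vals with
  | [] => true
  | v :: rest =>
    if v < 1 || target < v || PySem.Set.contains seen v then false
    else pvAltLoop target (PySem.Set.add seen v) rest

def full_numbers_alt (ls : List (List Int)) : Bool :=
  let n : Int := (ls.length : Int)
  let target : Int := n * n
  let vals : List Int := ls.flatMap (fun row => PySem.List.slice row none (some n))
  if (vals.length : Int) ≠ target then false
  else pvAltLoop target PySem.Set.empty vals

-- ===== PRECONDITION & SPEC =====
-- Pre_ excludes exactly the inputs where A raises IndexError: some of the first
-- len(ls) entries of some row ls[i] (i < len(ls)) does not exist.
def Pre_full_numbers (ls : List (List Int)) : Prop :=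
  ∀ row ∈ ls, ls.length ≤ row.length

instance (ls : List (List Int)) : Decidable (Pre_full_numbers ls) := by
  unfold Pre_full_numbers; infer_instance

def pvWitness_full_numbers : List (List Int) := [[2, 1], [3, 4]]

def Spec_full_numbers (ls : List (List Int)) (out : Bool) : Prop := out = full_numbers_alt ls
instance (ls : List (List Int)) (out : Bool) : Decidable (Spec_full_numbers ls out) := by unfold Spec_full_numbers; infer_instance

-- ===== CLAIM (what is proved, stated in full; the proofs are below) =====
def Claim_equal_full_numbers : Prop := ∀ (ls : List (List Int)), Dom_full_numbers ls → Pre_full_numbers ls → Spec_full_numbers ls (full_numbers ls)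

-- ===== LEMMAS AND PROOFS =====

-- the first n entries of a row, read by index, are row.take n
theorem pv_map_pyGetD_take (row : List Int) (n : Nat) (h : n ≤ row.length) :
    (PySem.List.pyRange 0 (n : Int) 1).map (fun j => PySem.List.pyGetD row j 0) = row.take n := by
  rw [PySem.List.pyRange_zero, List.map_map]
  apply List.ext_getElem
  · simp [h]
  · intro i h1 h2
    have hi : i < row.length := lt_of_lt_of_le h2 (by simp)
    simp [PySem.List.pyGetD_natCast, List.getD_eq_getElem?_getD,
      List.getElem?_eq_getElem hi, List.getElem_take]

-- A's nested index loops build the flatten of the first n entries of each row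
theorem pv_lsn_eq (ls : List (List Int)) (h : Pre_full_numbers ls) :
    (PySem.List.pyRange 0 (ls.length : Int) 1).foldl (fun acc i =>
      (PySem.List.pyRange 0 (ls.length : Int) 1).foldl (fun acc j =>
        acc ++ [PySem.List.pyGetD (PySem.List.pyGetD ls i []) j 0]) acc) []
    = ls.flatMap (fun row => row.take ls.length) := by
  have inner : ∀ (row : List Int) (acc : List Int), row ∈ ls →
      (PySem.List.pyRange 0 (ls.length : Int) 1).foldl (fun acc j =>
        acc ++ [PySem.List.pyGetD row j 0]) acc = acc ++ row.take ls.length := by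
    intro row acc hrow
    rw [PySem.List.foldl_append_singleton_eq_map, pv_map_pyGetD_take row ls.length (h row hrow)]
  calc (PySem.List.pyRange 0 (ls.length : Int) 1).foldl (fun acc i =>
        (PySem.List.pyRange 0 (ls.length : Int) 1).foldl (fun acc j =>
          acc ++ [PySem.List.pyGetD (PySem.List.pyGetD ls i []) j 0]) acc) []
      = (PySem.List.pyRange 0 (ls.length : Int) 1).foldl (fun acc i =>
          acc ++ (PySem.List.pyGetD ls i []).take ls.length) [] := by
        apply PySem.List.foldl_congr_mem
        intro acc i hi
        rcases PySem.List.mem_pyRange_one.mp hi with ⟨h1, h2⟩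
        exact inner _ acc (PySem.List.pyGetD_mem ls [] ⟨by omega, by simpa using h2⟩)
    _ = (PySem.List.pyRange 0 (ls.length : Int) 1).flatMap
          (fun i => (PySem.List.pyGetD ls i []).take ls.length) := by
        rw [PySem.List.foldl_append_eq_flatMap]; simp
    _ = ls.flatMap (fun row => row.take ls.length) := by
        have h2 := PySem.List.map_pyGetD_pyRange_zero ls ([] : List Int)
        rw [show (PySem.List.len ls : Int) = (ls.length : Int) from by simp] at h2
        rw [List.flatMap, List.flatMap]
        congr 1
        have h3 : (List.map (fun i => List.take ls.length (PySem.List.pyGetD ls i []))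
              (PySem.List.pyRange 0 (ls.length : Int)))
            = List.map (fun row => List.take ls.length row)
                (List.map (fun j => PySem.List.pyGetD ls j []) (PySem.List.pyRange 0 (ls.length : Int))) := by
          rw [List.map_map]
          rfl
        rw [h3, h2]

-- characterisation of the early-exit loop
theorem pv_altLoop_iff (target : Int) (vals : List Int) : ∀ (seen : PySem.Set Int),
    pvAltLoop target seen vals = true ↔
      (∀ v ∈ vals, 1 ≤ v ∧ v ≤ target) ∧ vals.Nodup ∧ ∀ v ∈ vals, v ∉ seen := by
  induction vals with
  | nil => intro seen; simp [pvAltLoop]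
  | cons v rest ih =>
    intro seen
    by_cases hb : v < 1 ∨ target < v ∨ v ∈ seen
    · have hcond : (v < 1 || target < v || PySem.Set.contains seen v) = true := by
        simp only [PySem.Set.contains_eq_decide, Bool.or_eq_true, decide_eq_true_eq]
        tauto
      have hfalse : pvAltLoop target seen (v :: rest) = false := by
        unfold pvAltLoop
        rw [hcond]
        rfl
      rw [hfalse]
      constructor
      · intro h; cases h
      · rintro ⟨hbd, _, hs⟩
        exfalso
        rcases hb with h | h | h
        · exact absurd (hbd v (by simp)).1 (by omega)
        · exact absurd (hbd v (by simp)).2 (by omega)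
        · exact hs v (by simp) h
    · push Not at hb
      obtain ⟨h1, h2, h3⟩ := hb
      have hcond : (v < 1 || target < v || PySem.Set.contains seen v) = false := by
        simp only [PySem.Set.contains_eq_decide, Bool.or_eq_false_iff, decide_eq_false_iff_not]
        exact ⟨⟨by omega, by omega⟩, h3⟩
      have hstep : pvAltLoop target seen (v :: rest) = pvAltLoop target (PySem.Set.add seen v) rest := by
        conv_lhs => unfold pvAltLoop
        rw [hcond]
        simp
      rw [hstep, ih (PySem.Set.add seen v)]
      simp only [List.nodup_cons, List.mem_cons]
      constructor
      · rintro ⟨hbd, hnd, hs⟩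
        refine ⟨?_, ⟨?_, hnd⟩, ?_⟩
        · rintro x (rfl | hx)
          · exact ⟨h1, h2⟩
          · exact hbd x hx
        · intro hv; exact (hs v hv) (by rw [PySem.Set.mem_add]; right; rfl)
        · rintro x (rfl | hx)
          · exact h3
          · intro hxs; exact hs x hx (by rw [PySem.Set.mem_add]; left; exact hxs)
      · rintro ⟨hbd, ⟨hvr, hnd⟩, hs⟩
        refine ⟨fun x hx => hbd x (Or.inr hx), hnd, ?_⟩
        intro x hx
        rw [PySem.Set.mem_add]
        rintro (hxs | rfl)
        · exact hs x (Or.inr hx) hxs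
        · exact hvr hx

-- sorted(xs) == [1..N] iff xs is a permutation of [1..N]
theorem pv_sorted_eq_range_iff (xs : List Int) (N : Int) :
    PySem.List.sorted xs (fun x => x) false = PySem.List.pyRange 1 (N + 1) 1 ↔
      xs.Perm (PySem.List.pyRange 1 (N + 1) 1) := by
  constructor
  · intro h
    have hp := PySem.List.sorted_perm xs (fun x => x) false
    rw [h] at hp
    exact hp.symm
  · intro h
    exact PySem.List.sorted_eq_of_perm_of_pairwise_lt xs _ (fun x => x) h.symm
      (PySem.List.pairwise_lt_pyRange_one 1 (N + 1))

-- permutation of [1..N] iff length N, no duplicates, all in [1, N]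
theorem pv_perm_range_iff (xs : List Int) (N : Int) (hlen : (xs.length : Int) = N) :
    xs.Perm (PySem.List.pyRange 1 (N + 1) 1) ↔
      xs.Nodup ∧ ∀ v ∈ xs, 1 ≤ v ∧ v ≤ N := by
  constructor
  · intro h
    refine ⟨h.nodup_iff.mpr (PySem.List.nodup_pyRange_one 1 (N + 1)), ?_⟩
    intro v hv
    have := PySem.List.mem_pyRange_one.mp (h.mem_iff.mp hv)
    omega
  · rintro ⟨hnd, hbd⟩
    have hsub : xs ⊆ PySem.List.pyRange 1 (N + 1) 1 := by
      intro v hv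
      rw [PySem.List.mem_pyRange_one]
      have := hbd v hv; omega
    have hlen2 : (PySem.List.pyRange 1 (N + 1) 1).length ≤ xs.length := by
      rw [PySem.List.length_pyRange_one]; omega
    exact (hnd.subperm hsub).perm_of_length_le hlen2

-- ===== VERDICT (by name: the statement is the Claim_ definition above) =====
theorem full_numbers_spec : Claim_equal_full_numbers := by
  intro ls _ hpre
  unfold Spec_full_numbers full_numbers full_numbers_alt
  simp only []
  rw [pv_lsn_eq ls hpre]
  have hflat : ls.flatMap (fun row => PySem.List.slice row none (some (ls.length : Int)))
      = ls.flatMap (fun row => row.take ls.length) := by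
    apply List.flatMap_congr
    intro row _
    exact PySem.List.slice_to_natCast row ls.length
  rw [hflat]
  set n : Nat := ls.length with hn
  set vals : List Int := ls.flatMap (fun row => row.take n) with hvals
  have hlenrow : ∀ row ∈ ls, (row.take n).length = n := by
    intro row hrow
    rw [List.length_take]
    exact Nat.min_eq_left (hpre row hrow)
  have hlen : vals.length = n * n := by
    rw [hvals, List.length_flatMap, List.map_congr_left hlenrow]
    simp [List.sum_replicate, List.map_const']
    omega
  have hN : ((n : Int) ^ 2 + 1) = (n : Int) * (n : Int) + 1 := by ring
  rw [hN]
  have hguard : ¬ ((vals.length : Int) ≠ (n : Int) * (n : Int)) := by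
    push_cast [hlen]; ring_nf; omega
  rw [if_neg hguard]
  have hiff : (PySem.List.sorted vals (fun x => x) false
        = PySem.List.pyRange 1 ((n : Int) * (n : Int) + 1) 1)
      ↔ pvAltLoop ((n : Int) * (n : Int)) PySem.Set.empty vals = true := by
    rw [pv_sorted_eq_range_iff,
      pv_perm_range_iff vals ((n : Int) * (n : Int)) (by push_cast [hlen]; ring),
      pv_altLoop_iff]
    simp only [PySem.Set.empty, List.not_mem_nil, not_false_iff, implies_true, and_true]
    tauto
  cases hAL : pvAltLoop ((n : Int) * (n : Int)) PySem.Set.empty vals with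
  | true => simp [hiff.mpr hAL]
  | false =>
    have : ¬ (PySem.List.sorted vals (fun x => x) false
        = PySem.List.pyRange 1 ((n : Int) * (n : Int) + 1) 1) := by
      intro hc
      rw [hiff.mp hc] at hAL
      cases hAL
    simp [this]
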